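-- pv_equiv track=rewrite | github.com/Triple-One-Intelligence/research-ai | api/app/pipelines/budget.py | fit_ranked_lines
-- ===== SOURCE A (Python) =====
-- def tokens(text: str) -> int:
--     return len(text) // 4  # ~4 chars per token for English text
--
-- def fit_ranked_lines(lines: list[str], budget: int) -> list[str]:
--     result, used = [], 0
--     for line in lines:
--         t = tokens(line)
--         if used + t > budget:
--             break
--         result.append(line)
--         used += t
--     return result
-- ===== SOURCE B (Python) =====
-- def fit_ranked_lines(lines: list[str], budget: int) -> list[str]:
--     # Build prefix sums of per-line token counts, then binary-search
--     # (bisect_right by hand, since no imports) for the number of leading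
--     # lines whose cumulative token total stays <= budget.
--     prefix = []
--     s = 0
--     for line in lines:
--         s += len(line) // 4
--         prefix.append(s)
--     lo, hi = 0, len(prefix)
--     while lo < hi:
--         mid = (lo + hi) // 2
--         if prefix[mid] <= budget:
--             lo = mid + 1
--         else:
--             hi = mid
--     return lines[:lo]
-- ===== Notes on version B (the rewrite author's own statement) =====
-- stated objective: alternative
-- what changed: Replaces the accumulate-and-break scan with a prefix-sum table plus a hand-written bisect_right binary search (valid since token counts are non-negative, so prefix sums are monotone), returning lines[:k].
import Mathlib
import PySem

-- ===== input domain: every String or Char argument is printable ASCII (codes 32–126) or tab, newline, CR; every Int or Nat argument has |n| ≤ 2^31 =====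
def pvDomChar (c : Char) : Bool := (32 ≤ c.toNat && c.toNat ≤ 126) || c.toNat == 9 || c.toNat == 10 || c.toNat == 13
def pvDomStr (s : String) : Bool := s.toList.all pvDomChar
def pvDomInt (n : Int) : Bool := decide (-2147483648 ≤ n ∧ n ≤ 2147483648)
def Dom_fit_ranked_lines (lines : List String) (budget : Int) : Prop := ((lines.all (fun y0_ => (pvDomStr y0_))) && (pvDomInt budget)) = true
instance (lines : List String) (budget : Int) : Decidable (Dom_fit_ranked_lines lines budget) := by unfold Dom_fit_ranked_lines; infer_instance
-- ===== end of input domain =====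

-- B replaces A's accumulate-and-break scan with a prefix-sum table plus a bisect_right
-- binary search; same O(n) cost, the equivalence rests on monotonicity of the prefix sums.

-- ===== PORT A =====
-- tokens(text) = len(text) // 4
def pyTokens (text : String) : Int := PySem.Int.floordiv (PySem.Str.len text) 4

-- the for-loop of A: `result` built by cons, `used` the accumulator; `break` returns []
def fitGoA (lines : List String) (budget used : Int) : List String :=
  match lines with
  | [] => []
  | line :: rest =>
    let t := pyTokens line
    if used + t > budget then []
    else line :: fitGoA rest budget (used + t)

def fit_ranked_lines (lines : List String) (budget : Int) : List String :=
  fitGoA lines budget 0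

-- ===== PORT B =====
-- the first loop of Source B: prefix sums of the token counts, running sum s
def prefixB (lines : List String) (s : Int) : List Int :=
  match lines with
  | [] => []
  | line :: rest =>
    let s' := s + PySem.Int.floordiv (PySem.Str.len line) 4
    s' :: prefixB rest s'

-- the while-loop of Source B (hand-written bisect_right); indices stay in [0, len],
-- so Nat indexing with getD is exact for Python's prefix[mid]
def bisectGoB (p : List Int) (budget : Int) (lo hi : Nat) : Nat :=
  if _h : lo < hi then
    let mid := (lo + hi) / 2
    if p.getD mid 0 ≤ budget then bisectGoB p budget (mid + 1) hi
    else bisectGoB p budget lo mid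
  else lo
termination_by hi - lo
decreasing_by all_goals omega

def fit_ranked_lines_alt (lines : List String) (budget : Int) : List String :=
  let p := prefixB lines 0
  lines.take (bisectGoB p budget 0 p.length)

-- ===== PRECONDITION & SPEC =====
def Spec_fit_ranked_lines (lines : List String) (budget : Int) (out : List String) : Prop := out = fit_ranked_lines_alt lines budget
instance (lines : List String) (budget : Int) (out : List String) : Decidable (Spec_fit_ranked_lines lines budget out) := by unfold Spec_fit_ranked_lines; infer_instance

-- ===== CLAIM (what is proved, stated in full; the proofs are below) =====
def Claim_equal_fit_ranked_lines : Prop := ∀ (lines : List String) (budget : Int), Dom_fit_ranked_lines lines budget → Spec_fit_ranked_lines lines budget (fit_ranked_lines lines budget)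

-- ===== LEMMAS AND PROOFS =====

-- token counts are non-negative
lemma pyTokens_nonneg (s : String) : 0 ≤ pyTokens s := by
  unfold pyTokens
  have h4 : (0:Int) < 4 := by norm_num
  rw [PySem.Int.floordiv_eq_ediv_of_pos h4]
  have hlen : 0 ≤ PySem.Str.len s := by simp [PySem.Str.len_eq]
  exact Int.ediv_nonneg hlen (by norm_num)

-- every entry of prefixB lines s is ≥ s
lemma prefixB_ge (lines : List String) (s : Int) :
    ∀ x ∈ prefixB lines s, s ≤ x := by
  induction lines generalizing s with
  | nil => simp [prefixB]
  | cons line rest ih =>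
    intro x hx
    simp only [prefixB, List.mem_cons] at hx
    have ht := pyTokens_nonneg line
    unfold pyTokens at ht
    rcases hx with rfl | hx
    · omega
    · have := ih (s + PySem.Int.floordiv (PySem.Str.len line) 4) x hx
      omega

-- prefix sums are monotone
lemma prefixB_pairwise (lines : List String) (s : Int) :
    (prefixB lines s).Pairwise (· ≤ ·) := by
  induction lines generalizing s with
  | nil => simp [prefixB]
  | cons line rest ih =>
    simp only [prefixB]
    exact List.Pairwise.cons (fun x hx => prefixB_ge _ _ x hx) (ih _)

-- A's loop takes exactly as many lines as leading prefix sums (from u) stay ≤ budget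
lemma fitGoA_eq_take (lines : List String) (budget u : Int) :
    fitGoA lines budget u =
      lines.take ((prefixB lines u).takeWhile (fun x => decide (x ≤ budget))).length := by
  induction lines generalizing u with
  | nil => simp [fitGoA, prefixB]
  | cons line rest ih =>
    have ht : PySem.Int.floordiv (PySem.Str.len line) 4 = pyTokens line := rfl
    simp only [fitGoA, prefixB, ht, List.takeWhile_cons]
    by_cases h : u + pyTokens line > budget
    · have hd : decide (u + pyTokens line ≤ budget) = false :=
        decide_eq_false (not_le.mpr h)
      rw [if_pos h, hd]
      simp
    · have hd : decide (u + pyTokens line ≤ budget) = true :=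
        decide_eq_true (not_lt.mp h)
      rw [if_neg h, hd]
      simp [ih]

-- elements of a pairwise-≤ list compared via getD
lemma getD_mono (p : List Int) (hp : p.Pairwise (· ≤ ·)) {i j : Nat}
    (hij : i ≤ j) (hj : j < p.length) : p.getD i 0 ≤ p.getD j 0 := by
  rcases eq_or_lt_of_le hij with rfl | hlt
  · exact le_refl _
  · have hi : i < p.length := lt_of_le_of_lt hij hj
    have := (List.pairwise_iff_getElem.mp hp) i j hi hj hlt
    simpa [List.getD_eq_getElem, hi, hj] using this

-- entries strictly before the takeWhile-length satisfy the predicate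
lemma tw_getD_le (p : List Int) (b : Int) (i : Nat)
    (hi : i < (p.takeWhile (fun x => decide (x ≤ b))).length) :
    p.getD i 0 ≤ b := by
  induction p generalizing i with
  | nil => simp at hi
  | cons x xs ih =>
    simp only [List.takeWhile] at hi
    by_cases hx : x ≤ b
    · simp only [hx, decide_true] at hi
      cases i with
      | zero => simpa using hx
      | succ n =>
        simp only [List.length_cons, Nat.succ_lt_succ_iff] at hi
        simpa using ih n hi
    · simp [hx] at hi
-- the entry at the takeWhile-length (if any) fails the predicate
lemma tw_getD_gt (p : List Int) (b : Int)
    (h : (p.takeWhile (fun x => decide (x ≤ b))).length < p.length) :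
    b < p.getD (p.takeWhile (fun x => decide (x ≤ b))).length 0 := by
  induction p with
  | nil => simp at h
  | cons x xs ih =>
    simp only [List.takeWhile] at h ⊢
    by_cases hx : x ≤ b
    · simp only [hx, decide_true] at h ⊢
      simp only [List.length_cons, Nat.succ_lt_succ_iff] at h
      simpa using ih h
    · simp [hx]
      omega

-- binary-search correctness: bisectGoB finds the takeWhile-length, given brackets
lemma bisectGoB_eq (p : List Int) (b : Int) (hp : p.Pairwise (· ≤ ·)) :
    ∀ (n lo hi : Nat), hi - lo ≤ n →
      lo ≤ (p.takeWhile (fun x => decide (x ≤ b))).length →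
      (p.takeWhile (fun x => decide (x ≤ b))).length ≤ hi →
      hi ≤ p.length →
      bisectGoB p b lo hi = (p.takeWhile (fun x => decide (x ≤ b))).length := by
  intro n
  induction n with
  | zero =>
    intro lo hi hn h1 h2 h3
    have hle : ¬ lo < hi := by omega
    rw [bisectGoB]
    simp only [hle, dite_false]
    omega
  | succ m ihm =>
    intro lo hi hn h1 h2 h3
    set k := (p.takeWhile (fun x => decide (x ≤ b))).length with hk
    by_cases hlt : lo < hi
    · have hm1 : lo ≤ (lo + hi) / 2 := by omega
      have hm2 : (lo + hi) / 2 < hi := by omega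
      rw [bisectGoB]
      simp only [hlt, dite_true]
      by_cases hc : p.getD ((lo + hi) / 2) 0 ≤ b
      · rw [if_pos hc]
        have hknew : (lo + hi) / 2 < k := by
          by_contra hcc
          rw [Nat.not_lt] at hcc
          have hklen : k < p.length := lt_of_le_of_lt hcc (lt_of_lt_of_le hm2 h3)
          have h4 := tw_getD_gt p b (hk ▸ hklen)
          have h5 := getD_mono p hp hcc (lt_of_lt_of_le hm2 h3)
          rw [← hk] at h4
          omega
        exact ihm ((lo + hi) / 2 + 1) hi (by omega) hknew h2 h3
      · rw [if_neg hc]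
        have hknew : k ≤ (lo + hi) / 2 := by
          by_contra hcc
          rw [Nat.not_le] at hcc
          have := tw_getD_le p b ((lo + hi) / 2) (hk ▸ hcc)
          omega
        exact ihm lo ((lo + hi) / 2) (by omega) h1 hknew
          (le_of_lt (lt_of_lt_of_le hm2 h3))
    · rw [bisectGoB]
      simp only [hlt, dite_false]
      omega

-- ===== VERDICT (by name: the statement is the Claim_ definition above) =====
theorem fit_ranked_lines_spec : Claim_equal_fit_ranked_lines := by
  intro lines budget _
  unfold Spec_fit_ranked_lines fit_ranked_lines fit_ranked_lines_alt
  rw [fitGoA_eq_take]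
  congr 1
  refine (bisectGoB_eq (prefixB lines 0) budget (prefixB_pairwise lines 0)
    (prefixB lines 0).length 0 (prefixB lines 0).length (by omega) (Nat.zero_le _)
    ?_ le_rfl).symm
  exact (List.takeWhile_prefix _).length_le
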